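-- pv_equiv track=rewrite | github.com/Lemonstars/algorithm | test3/2.整除查询/solution.py | num_div
-- ===== SOURCE A (Python) =====
-- def num_div(div_list, query_list):
--     res = list()
--     for item in query_list:
--         cnt = 0
--         for d in div_list:
--             if d % item == 0:
--                 cnt += 1
--         res.append(cnt)
--     return res
-- ===== SOURCE B (Python) =====
-- def num_div(div_list, query_list):
--     # alternative: frequency table over div_list + per-distinct-query memo
--     freq = {}
--     for d in div_list:
--         freq[d] = freq.get(d, 0) + 1
--     cache = {}
--     res = []
--     for q in query_list:
--         if q not in cache:
--             cache[q] = sum(c for d, c in freq.items() if d % q == 0)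
--         res.append(cache[q])
--     return res
-- ===== Notes on version B (the rewrite author's own statement) =====
-- stated objective: alternative
-- what changed: B builds a frequency dict of div_list once and memoizes the answer per distinct query, so each distinct query scans the distinct divisor values instead of every query rescanning the whole list; on random duplicate-free inputs the cost is the same as A's.
import Mathlib
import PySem

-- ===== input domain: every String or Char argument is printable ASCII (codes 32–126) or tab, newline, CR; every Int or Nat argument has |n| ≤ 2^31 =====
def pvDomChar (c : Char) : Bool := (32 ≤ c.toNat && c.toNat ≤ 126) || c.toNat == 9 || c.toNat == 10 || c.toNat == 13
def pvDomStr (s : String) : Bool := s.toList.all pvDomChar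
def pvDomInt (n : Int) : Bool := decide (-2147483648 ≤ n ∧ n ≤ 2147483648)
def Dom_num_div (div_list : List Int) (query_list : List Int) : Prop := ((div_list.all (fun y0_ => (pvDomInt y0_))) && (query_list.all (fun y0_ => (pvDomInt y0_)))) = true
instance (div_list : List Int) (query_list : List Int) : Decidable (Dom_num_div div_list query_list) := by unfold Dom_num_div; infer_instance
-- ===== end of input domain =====

-- B replaces A's per-query rescan of div_list by a frequency dict built once plus a per-distinct-query memo (objective: alternative; same worst-case cost on duplicate-free inputs).


-- ===== PORT A =====
def num_div (div_list : List Int) (query_list : List Int) : List Int :=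
  query_list.foldl (fun res item =>
    res ++ [div_list.foldl (fun cnt d => if PySem.Int.mod d item = 0 then cnt + 1 else cnt) 0]) []

-- ===== PORT B =====
-- sum(c for d, c in freq.items() if d % q == 0)
def numDivSum (freq : PySem.Dict Int Int) (q : Int) : Int :=
  freq.items.foldl (fun s p => if PySem.Int.mod p.1 q = 0 then s + p.2 else s) 0

def num_div_alt (div_list : List Int) (query_list : List Int) : List Int :=
  let freq := div_list.foldl (fun d x => d.insert x (d.getD x 0 + 1)) PySem.Dict.empty
  (query_list.foldl (fun (st : PySem.Dict Int Int × List Int) q =>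
      let cache := if st.1.contains q then st.1 else st.1.insert q (numDivSum freq q)
      (cache, st.2 ++ [cache.getD q 0]))
    (PySem.Dict.empty, [])).2

-- ===== PRECONDITION & SPEC =====
-- Pre_ excludes exactly the inputs where Python raises: query_list containing 0 makes `d % item` a ZeroDivisionError in both A and B.
def Pre_num_div (div_list : List Int) (query_list : List Int) : Prop :=
  ∀ q ∈ query_list, q ≠ 0
instance (div_list : List Int) (query_list : List Int) : Decidable (Pre_num_div div_list query_list) := by unfold Pre_num_div; infer_instance
def pvWitness_num_div : List Int × List Int := ([6, -4, 0, 3, 6], [3, -2, 1, 3])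

def Spec_num_div (div_list : List Int) (query_list : List Int) (out : List Int) : Prop := out = num_div_alt div_list query_list
instance (div_list : List Int) (query_list : List Int) (out : List Int) : Decidable (Spec_num_div div_list query_list out) := by unfold Spec_num_div; infer_instance

-- ===== CLAIM (what is proved, stated in full; the proofs are below) =====
def Claim_equal_num_div : Prop := ∀ (div_list : List Int) (query_list : List Int), Dom_num_div div_list query_list → Pre_num_div div_list query_list → Spec_num_div div_list query_list (num_div div_list query_list)

-- ===== LEMMAS AND PROOFS =====

-- A's inner loop as a function of the query
def numDivCountA (div_list : List Int) (q : Int) : Int :=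
  div_list.foldl (fun cnt d => if PySem.Int.mod d q = 0 then cnt + 1 else cnt) 0

lemma numDivSum_eq_map_sum (l : List (Int × Int)) (q : Int) (s : Int) :
    l.foldl (fun s p => if PySem.Int.mod p.1 q = 0 then s + p.2 else s) s
      = s + (l.map (fun p => if PySem.Int.mod p.1 q = 0 then p.2 else 0)).sum := by
  induction l generalizing s with
  | nil => simp
  | cons p l ih => simp [ih]; split_ifs <;> ring

-- sum over the distinct keys of the (count as Int) of keys satisfying P equals countP over the list
lemma count_filter_ite (xs : List Int) (P : Int → Bool) (a : Int) :
    (xs.filter P).count a = if P a then xs.count a else 0 := by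
  by_cases h : P a
  · simp [h, List.count_filter]
  · simp [h, List.count_eq_zero]

lemma sum_ofList_count (xs : List Int) (P : Int → Bool) :
    ((PySem.Set.ofList xs).map (fun k => if P k then (xs.count k : Int) else 0)).sum
      = (xs.countP P : Int) := by
  rw [← List.sum_toFinset (fun k => if P k then (xs.count k : Int) else 0) (PySem.Set.nodup_ofList xs)]
  have hfs : (PySem.Set.ofList xs).toFinset = xs.toFinset := by
    ext a; simp [PySem.Set.mem_ofList]
  rw [hfs]
  have h1 : ∀ a ∈ xs.toFinset, (if P a then (xs.count a : Int) else 0) = ((xs.filter P).count a : Int) := by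
    intro a _; rw [count_filter_ite]; split_ifs <;> simp
  rw [Finset.sum_congr rfl h1]
  have hsub : (List.filter P xs).toFinset ⊆ xs.toFinset := by
    intro a ha; simp only [List.mem_toFinset, List.mem_filter] at *; exact ha.1
  rw [← Finset.sum_subset hsub]
  · rw [← Nat.cast_sum, List.sum_toFinset_count_eq_length, List.countP_eq_length_filter]
  · intro a _ ha
    have : a ∉ List.filter P xs := by simpa [List.mem_toFinset] using ha
    simp [List.count_eq_zero_of_not_mem this]

lemma numDivCountA_eq_countP (div_list : List Int) (q : Int) :
    numDivCountA div_list q = (div_list.countP (fun d => PySem.Int.mod d q = 0) : Int) := by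
  have := PySem.List.foldl_count_if (fun d => decide (PySem.Int.mod d q = 0)) div_list (0:Int)
  simp only [decide_eq_true_eq] at this
  simpa [numDivCountA] using this

lemma numDivSum_counter (div_list : List Int) (q : Int) :
    numDivSum (PySem.Dict.counter div_list) q = numDivCountA div_list q := by
  rw [numDivSum, numDivSum_eq_map_sum, PySem.Dict.items_counter, List.map_map]
  have h := sum_ofList_count div_list (fun d => decide (PySem.Int.mod d q = 0))
  simp only [decide_eq_true_eq] at h
  rw [numDivCountA_eq_countP]
  simpa [Function.comp] using h

-- memo-loop invariant: cached values are the true answers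
lemma loop_spec (g : Int → Int) (freq : PySem.Dict Int Int)
    (hfg : ∀ q, numDivSum freq q = g q)
    (qs : List Int) (cache : PySem.Dict Int Int) (res : List Int)
    (hc : ∀ k, cache.contains k = true → cache.getD k 0 = g k) :
    (qs.foldl (fun (st : PySem.Dict Int Int × List Int) q =>
        let cache := if st.1.contains q then st.1 else st.1.insert q (numDivSum freq q)
        (cache, st.2 ++ [cache.getD q 0])) (cache, res)).2 = res ++ qs.map g := by
  induction qs generalizing cache res with
  | nil => simp
  | cons q qs ih =>
    simp only [List.foldl_cons, List.map_cons]
    by_cases hq : cache.contains q = true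
    · rw [if_pos hq]
      rw [ih cache (res ++ [cache.getD q 0]) hc]
      simp [hc q hq]
    · rw [if_neg hq]
      have hval : (cache.insert q (numDivSum freq q)).getD q 0 = g q := by
        rw [PySem.Dict.getD_insert_self]; exact hfg q
      have hc' : ∀ k, (cache.insert q (numDivSum freq q)).contains k = true →
          (cache.insert q (numDivSum freq q)).getD k 0 = g k := by
        intro k hk
        by_cases hkq : k = q
        · subst hkq; exact hval
        · rw [PySem.Dict.getD_insert, if_neg hkq]
          rw [PySem.Dict.contains_insert] at hk
          apply hc
          simpa [hkq] using hk
      rw [ih _ (res ++ [(cache.insert q (numDivSum freq q)).getD q 0]) hc']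
      simp [hval]

-- ===== VERDICT (by name: the statement is the Claim_ definition above) =====
theorem num_div_spec : Claim_equal_num_div := by
  intro div_list query_list _ _
  unfold Spec_num_div num_div num_div_alt
  rw [PySem.List.foldl_append_singleton_eq_map]
  rw [PySem.Dict.foldl_insert_getD_add_one_eq_counter]
  rw [loop_spec (numDivCountA div_list) (PySem.Dict.counter div_list)
        (numDivSum_counter div_list) query_list PySem.Dict.empty []
        (by intro k hk; simp [PySem.Dict.contains_empty] at hk)]
  simp [numDivCountA]
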